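-- pv_equiv track=rewrite | github.com/phujck/mcp-gerard | src/mcp_handley_lab/microsoft/excel/ops/dates.py | is_date_format
-- ===== SOURCE A (Python) =====
-- def is_date_format(format_code: str | None) -> bool:
--     """Check if a number format code indicates a date/time format.
--
--     This is a heuristic check based on common date/time format patterns.
--
--     Args:
--         format_code: Excel number format code (e.g., "mm-dd-yy", "h:mm:ss").
--
--     Returns:
--         True if the format appears to be a date/time format.
--     """
--     if not format_code:
--         return False
--
--     # Normalize for comparison
--     code = format_code.lower()
--
--     # Skip obvious non-date formats
--     if code in ("general", "@", "0", "0.00", "#,##0", "#,##0.00"):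
--         return False
--
--     # Date indicators (case-insensitive)
--     date_tokens = {"y", "m", "d"}  # year, month, day
--     time_tokens = {"h", "s"}  # hour, second (m is ambiguous - could be minute)
--
--     # Check for date/time tokens outside of quoted strings
--     in_quote = False
--     found_date = False
--     found_time = False
--
--     i = 0
--     while i < len(code):
--         char = code[i]
--
--         if char == '"':
--             in_quote = not in_quote
--         elif not in_quote:
--             if char in date_tokens:
--                 found_date = True
--             elif char in time_tokens:
--                 found_time = True
--             # 'm' next to 'h' or 's' is minutes, otherwise it's month
--             elif char == "m":
--                 # Check context
--                 prev_char = code[i - 1] if i > 0 else ""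
--                 next_char = code[i + 1] if i < len(code) - 1 else ""
--                 if prev_char in ("h", ":") or next_char in ("s", ":"):
--                     found_time = True  # minutes
--                 else:
--                     found_date = True  # month
--
--         i += 1
--
--     return found_date or found_time
-- ===== SOURCE B (Python) =====
-- def is_date_format(format_code):
--     """Date/time-format heuristic: true iff some character is a date/time letter
--     and an even number of double quotes precede it (i.e. it lies outside quotes)."""
--     if not format_code:
--         return False
--     code = format_code.lower()
--     return any(
--         c in "ymdhs" and code[:i].count('"') % 2 == 0
--         for i, c in enumerate(code)
--     )
-- ===== Notes on version B (the rewrite author's own statement) =====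
-- stated objective: simpler
-- what changed: Replaces A's stateful index loop (quote toggle, found_date/found_time flags, exclusion list, dead minute-vs-month context branch) by a flat any(...) that tests each character for being one of the five date/time letters and decides whether it lies outside double quotes by the parity of the quote count in the preceding prefix; any(...) short-circuits at the first such character, while A always scans to the end (on letter-free strings B is quadratic).
import Mathlib
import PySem

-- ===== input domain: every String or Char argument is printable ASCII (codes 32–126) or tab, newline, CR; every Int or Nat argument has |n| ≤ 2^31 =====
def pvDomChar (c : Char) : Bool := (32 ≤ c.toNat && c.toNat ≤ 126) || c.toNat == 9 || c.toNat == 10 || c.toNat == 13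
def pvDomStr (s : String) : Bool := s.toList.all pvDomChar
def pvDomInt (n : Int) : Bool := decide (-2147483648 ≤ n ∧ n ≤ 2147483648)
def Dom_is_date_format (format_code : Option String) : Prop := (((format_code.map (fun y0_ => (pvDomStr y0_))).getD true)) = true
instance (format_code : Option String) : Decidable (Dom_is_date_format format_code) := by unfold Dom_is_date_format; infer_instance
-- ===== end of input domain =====

-- B replaces A's stateful quote-toggle automaton by a flat any(...) that decides, per character,
-- whether it lies outside quotes via the parity of quotes in the preceding prefix (objective: simpler).

-- ===== PORT A =====
-- the while-loop of A: index i, in_quote/found_date/found_time state, guarded code[i±1] peeks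
def pvLoopA (code : List Char) (i : Nat) (in_quote found_date found_time : Bool) : Bool :=
  if h : i < code.length then
    let c := code[i]
    if c = '"' then pvLoopA code (i + 1) (!in_quote) found_date found_time
    else if !in_quote then
      if c ∈ (['y', 'm', 'd'] : List Char) then pvLoopA code (i + 1) in_quote true found_time
      else if c ∈ (['h', 's'] : List Char) then pvLoopA code (i + 1) in_quote found_date true
      else if c = 'm' then
        -- prev_char / next_char: Python's "" sentinel is modelled as none (accesses are in range)
        let prev : Option Char := if 0 < i then code[i - 1]? else none
        let next : Option Char := if i < code.length - 1 then code[i + 1]? else none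
        if prev = some 'h' ∨ prev = some ':' ∨ next = some 's' ∨ next = some ':' then
          pvLoopA code (i + 1) in_quote found_date true
        else pvLoopA code (i + 1) in_quote true found_time
      else pvLoopA code (i + 1) in_quote found_date found_time
    else pvLoopA code (i + 1) in_quote found_date found_time
  else found_date || found_time
termination_by code.length - i

def is_date_format (format_code : Option String) : Bool :=
  match format_code with
  | none => false
  | some s =>
    if s = "" then false
    else
      let code := PySem.Str.lower s
      if code ∈ (["general", "@", "0", "0.00", "#,##0", "#,##0.00"] : List String) then false
      else pvLoopA code.toList 0 false false false

-- ===== PORT B =====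
def is_date_format_alt (format_code : Option String) : Bool :=
  match format_code with
  | none => false
  | some s =>
    if s = "" then false
    else
      let code := PySem.Str.lower s
      -- any(c in "ymdhs" and code[:i].count('"') % 2 == 0 for i, c in enumerate(code))
      (PySem.List.enumerate code.toList 0).any fun ic =>
        decide (ic.2 ∈ (['y', 'm', 'd', 'h', 's'] : List Char)) &&
          (PySem.List.count (PySem.List.slice code.toList none (some ic.1)) '"') % 2 == 0

-- ===== PRECONDITION & SPEC =====
def Spec_is_date_format (format_code : Option String) (out : Bool) : Prop := out = is_date_format_alt format_code
instance (format_code : Option String) (out : Bool) : Decidable (Spec_is_date_format format_code out) := by unfold Spec_is_date_format; infer_instance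

-- ===== CLAIM (what is proved, stated in full; the proofs are below) =====
def Claim_equal_is_date_format : Prop := ∀ (format_code : Option String), Dom_is_date_format format_code → Spec_is_date_format format_code (is_date_format format_code)

-- ===== LEMMAS AND PROOFS =====

/-- The common semantics: scan with a quote-parity flag, true iff some date/time letter outside quotes. -/
def pvTok : List Char → Bool → Bool
  | [], _ => false
  | c :: cs, q =>
    if c = '"' then pvTok cs (!q)
    else if !q && decide (c ∈ (['y', 'm', 'd', 'h', 's'] : List Char)) then true
    else pvTok cs q

set_option maxRecDepth 4000 in
theorem pvLoopA_eq_tok (code : List Char) : ∀ (n i : Nat) (q d t : Bool),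
    code.length ≤ i + n → pvLoopA code i q d t = (d || t || pvTok (code.drop i) q) := by
  intro n
  induction n with
  | zero =>
    intro i q d t hn
    have h : ¬ i < code.length := by omega
    rw [pvLoopA]
    simp [h, List.drop_of_length_le (by omega : code.length ≤ i), pvTok]
  | succ n ih =>
    intro i q d t hn
    rw [pvLoopA]
    by_cases h : i < code.length
    · have hdrop : code.drop i = code[i] :: code.drop (i + 1) := List.drop_eq_getElem_cons h
      have ih' : ∀ q d t : Bool,
          pvLoopA code (i + 1) q d t = (d || t || pvTok (code.drop (i + 1)) q) :=
        fun q d t => ih (i + 1) q d t (by omega)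
      rw [dif_pos h]
      by_cases hq : code[i] = '"'
      · simp [hdrop, hq, pvTok, ih']
      · cases q with
        | true =>
          rw [if_neg hq]
          simp only [Bool.not_true]
          rw [if_neg (by simp : ¬ (false = true)), ih', hdrop]
          simp [pvTok, hq]
        | false =>
          by_cases h1 : code[i] ∈ (['y', 'm', 'd'] : List Char)
          · simp only [List.mem_cons, List.not_mem_nil, or_false] at h1
            rcases h1 with h1 | h1 | h1 <;> simp [hdrop, h1, pvTok, ih']
          · by_cases h2 : code[i] ∈ (['h', 's'] : List Char)
            · simp only [List.mem_cons, List.not_mem_nil, or_false] at h2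
              rcases h2 with h2 | h2 <;>
                simp [hdrop, h2, pvTok, ih',
                  (by simp [h2] : code[i] ∉ (['y', 'm', 'd'] : List Char))]
            · by_cases hm : code[i] = 'm'
              · exact absurd (by simp [hm]) h1
              · have hbig : code[i] ∉ (['y', 'm', 'd', 'h', 's'] : List Char) := by
                  simp only [List.mem_cons, List.not_mem_nil, or_false] at h1 h2 ⊢
                  tauto
                rw [if_neg hq]
                simp only [Bool.not_false, if_true]
                rw [if_neg h1, if_neg h2, if_neg hm, ih', hdrop]
                simp [pvTok, hq, hbig]
    · have hdrop : code.drop i = [] := List.drop_of_length_le (by omega)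
      simp [h, hdrop, pvTok]

theorem pvAny_eq_tok (suf : List Char) : ∀ (pre : List Char),
    ((PySem.List.enumerate suf (pre.length : Int)).any fun ic =>
        decide (ic.2 ∈ (['y', 'm', 'd', 'h', 's'] : List Char)) &&
          (PySem.List.count (PySem.List.slice (pre ++ suf) none (some ic.1)) '"') % 2 == 0)
      = pvTok suf (decide (List.count '"' pre % 2 = 1)) := by
  induction suf with
  | nil => intro pre; simp [PySem.List.enumerate, pvTok]
  | cons c cs ih =>
    intro pre
    rw [PySem.List.enumerate_cons, List.any_cons]
    have h0 : PySem.List.slice (pre ++ c :: cs) none (some ((pre.length : Nat) : Int))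
        = pre := by
      rw [PySem.List.slice_to_natCast]; simp
    have hshift : ((pre.length : Int) + 1) = (((pre ++ [c]).length : Nat) : Int) := by
      simp
    have happ : pre ++ c :: cs = (pre ++ [c]) ++ cs := by simp
    rw [h0, hshift, happ, ih (pre ++ [c])]
    have hcnt : List.count '"' (pre ++ [c])
        = List.count '"' pre + (if c = '"' then 1 else 0) := by
      simp [List.count_append, List.count_singleton, beq_iff_eq]
    by_cases hc : c = '"'
    · subst hc
      simp only [pvTok, if_pos rfl]
      have : decide (List.count '"' (pre ++ ['"']) % 2 = 1)
          = !decide (List.count '"' pre % 2 = 1) := by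
        rw [hcnt]; simp only [if_pos rfl]
        rcases Nat.mod_two_eq_zero_or_one (List.count '"' pre) with h | h <;>
          simp [Nat.add_mod, h]
      rw [this]
      simp [PySem.List.count_eq]
    · have hsame : List.count '"' (pre ++ [c]) = List.count '"' pre := by
        rw [hcnt]; simp [hc]
      rw [hsame]
      simp only [pvTok, if_neg hc, PySem.List.count_eq]
      rcases Nat.mod_two_eq_zero_or_one (List.count '"' pre) with h | h <;>
        by_cases hmem : c ∈ (['y', 'm', 'd', 'h', 's'] : List Char) <;>
          simp [h, hmem]

theorem pvTok_of_excluded (s : String)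
    (h : s ∈ (["general", "@", "0", "0.00", "#,##0", "#,##0.00"] : List String)) :
    pvTok s.toList false = false := by
  fin_cases h <;> decide

-- ===== VERDICT (by name: the statement is the Claim_ definition above) =====
theorem is_date_format_spec : Claim_equal_is_date_format := by
  intro format_code _
  unfold Spec_is_date_format is_date_format is_date_format_alt
  match format_code with
  | none => rfl
  | some s =>
    by_cases hs : s = ""
    · simp [hs]
    · simp only [if_neg hs]
      have hB : ((PySem.List.enumerate (PySem.Str.lower s).toList 0).any fun ic =>
          decide (ic.2 ∈ (['y', 'm', 'd', 'h', 's'] : List Char)) &&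
            (PySem.List.count (PySem.List.slice (PySem.Str.lower s).toList none (some ic.1)) '"') % 2 == 0)
          = pvTok (PySem.Str.lower s).toList false := by
        have := pvAny_eq_tok (PySem.Str.lower s).toList ([] : List Char)
        simpa using this
      rw [hB]
      by_cases hm : PySem.Str.lower s ∈ (["general", "@", "0", "0.00", "#,##0", "#,##0.00"] : List String)
      · rw [if_pos hm, pvTok_of_excluded _ hm]
      · rw [if_neg hm, pvLoopA_eq_tok (PySem.Str.lower s).toList (PySem.Str.lower s).toList.length 0 false false false (by omega)]
        simp
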